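-- pv_equiv track=rewrite | github.com/SamJ70/nogat-ass | pptx_inconsistency_checker.py | overlapping_batches
-- ===== SOURCE A (Python) =====
-- from typing import List, Dict, Any
--
-- MAX_SLIDES_PER_GEMINI_REQUEST = 10   # slides per batch
--
-- BATCH_OVERLAP = 3                    # overlap
--
-- def overlapping_batches(items: List[Any], size=MAX_SLIDES_PER_GEMINI_REQUEST, overlap=BATCH_OVERLAP):
--     if size <= 0:
--         yield items
--         return
--     n = len(items)
--     if n == 0:
--         return
--     i = 0
--     step = size - overlap if size > overlap else size
--     yielded = set()
--     while i < n:
--         batch = items[i:i + size]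
--         key = tuple([s["slide_index"] for s in batch])
--         if key not in yielded:
--             yielded.add(key)
--             yield batch
--         i += step
--         if i + size >= n and i < n:
--             final_batch = items[max(0, n - size):n]
--             key2 = tuple([s["slide_index"] for s in final_batch])
--             if key2 not in yielded:
--                 yield final_batch
--             break
-- ===== SOURCE B (Python) =====
-- MAX_SLIDES_PER_GEMINI_REQUEST = 10
-- BATCH_OVERLAP = 3
--
-- def overlapping_batches(items, size=MAX_SLIDES_PER_GEMINI_REQUEST, overlap=BATCH_OVERLAP):
--     if size <= 0:
--         yield items
--         return
--     n = len(items)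
--     if n == 0:
--         return
--     step = size - overlap if size > overlap else size
--     # closed-form count of regular windows: start 0 plus every k*step (k>=1) with k*step+size < n
--     m = 1 + ((n - size - 1) // step if n > size else 0)
--     batches = [items[k * step:k * step + size] for k in range(m)]
--     if m * step < n:
--         batches.append(items[max(0, n - size):n])
--     # dedup by slide_index key, keeping first occurrences, via an insertion-ordered dict
--     uniq = {}
--     for b in batches:
--         uniq.setdefault(tuple(s["slide_index"] for s in b), b)
--     yield from uniq.values()
-- ===== Notes on version B (the rewrite author's own statement) =====
-- stated objective: alternative
-- what changed: A walks the items with a while-loop that interleaves slicing, set-based dedup and a break-out final-window check; B has no while-loop at all: it computes the number of regular windows by a closed-form floor division, builds all batches with a range comprehension (plus the optional end-aligned tail), and deduplicates by slide_index key with dict.setdefault, yielding the dict's values.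
import Mathlib
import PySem

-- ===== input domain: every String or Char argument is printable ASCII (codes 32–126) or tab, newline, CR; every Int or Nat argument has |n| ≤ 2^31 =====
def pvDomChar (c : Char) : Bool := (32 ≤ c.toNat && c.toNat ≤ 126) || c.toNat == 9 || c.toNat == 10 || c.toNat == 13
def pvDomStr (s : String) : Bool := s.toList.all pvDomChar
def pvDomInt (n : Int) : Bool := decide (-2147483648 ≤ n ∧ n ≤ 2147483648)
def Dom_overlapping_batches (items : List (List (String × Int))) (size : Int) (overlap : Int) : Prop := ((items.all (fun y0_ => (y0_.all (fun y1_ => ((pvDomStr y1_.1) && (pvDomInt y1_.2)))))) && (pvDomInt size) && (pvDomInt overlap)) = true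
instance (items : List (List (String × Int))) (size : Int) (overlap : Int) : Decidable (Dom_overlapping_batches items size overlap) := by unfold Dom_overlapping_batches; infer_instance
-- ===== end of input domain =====

-- B drops A's while/break loop entirely: a closed-form floor division counts the regular windows,
-- a range comprehension builds all batches (+ optional end-aligned tail), and dict.setdefault
-- deduplicates by slide_index key; same cost, different algorithmic organisation.
-- Generators are ported as the list of yielded batches.

-- ===== PORT A =====
-- key = tuple(s["slide_index"] for s in batch); under Pre_ every dict has the key, so getD 0 never fires
def pvSlideKey (batch : List (List (String × Int))) : List Int :=
  batch.map (fun s => (PySem.Dict.get? ⟨s⟩ "slide_index").getD 0)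

-- A's while-loop; fuel ≥ n suffices since i grows by step ≥ 1 each pass
def pvLoopA (items : List (List (String × Int))) (n size step : Int)
    (i : Int) (yielded : PySem.Set (List Int)) : Nat → List (List (List (String × Int)))
  | 0 => []
  | fuel+1 =>
    if i < n then
      let batch := PySem.List.slice items (some i) (some (i + size))
      let key := pvSlideKey batch
      let keep := ¬ PySem.Set.contains yielded key
      let out1 := if keep then [batch] else []
      let yielded' := if keep then PySem.Set.add yielded key else yielded
      let i' := i + step
      if n ≤ i' + size ∧ i' < n then
        let finalb := PySem.List.slice items (some (max 0 (n - size))) (some n)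
        out1 ++ (if PySem.Set.contains yielded' (pvSlideKey finalb) then [] else [finalb])
      else
        out1 ++ pvLoopA items n size step i' yielded' fuel
    else []

def overlapping_batches (items : List (List (String × Int))) (size : Int) (overlap : Int) : List (List (List (String × Int))) :=
  if size ≤ 0 then [items]
  else
    let n : Int := items.length
    if n = 0 then []
    else
      let step := if size > overlap then size - overlap else size
      pvLoopA items n size step 0 PySem.Set.empty (items.length + 1)

-- ===== PORT B =====
-- Source B's "for b in batches: uniq.setdefault(key(b), b)" loop
def pvDedupB : List (List (List (String × Int))) → PySem.Dict (List Int) (List (List (String × Int))) → PySem.Dict (List Int) (List (List (String × Int)))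
  | [], d => d
  | b :: rest, d => pvDedupB rest (PySem.Dict.setdefault d (pvSlideKey b) b)

def overlapping_batches_alt (items : List (List (String × Int))) (size : Int) (overlap : Int) : List (List (List (String × Int))) :=
  if size ≤ 0 then [items]
  else
    let n : Int := items.length
    if n = 0 then []
    else
      let step := if size > overlap then size - overlap else size
      let m := 1 + (if n > size then PySem.Int.floordiv (n - size - 1) step else 0)
      let batches := (PySem.List.pyRange 0 m 1).map
        (fun k => PySem.List.slice items (some (k * step)) (some (k * step + size)))
      let batches2 := if m * step < n then
          batches ++ [PySem.List.slice items (some (max 0 (n - size))) (some n)]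
        else batches
      (pvDedupB batches2 PySem.Dict.empty).values

-- ===== PRECONDITION & SPEC =====
-- Pre_ excludes exactly the inputs where A raises KeyError: size > 0 with some dict lacking "slide_index"
def Pre_overlapping_batches (items : List (List (String × Int))) (size : Int) (overlap : Int) : Prop :=
  size ≤ 0 ∨ ∀ d ∈ items, PySem.Dict.contains ⟨d⟩ "slide_index" = true
instance (items : List (List (String × Int))) (size : Int) (overlap : Int) : Decidable (Pre_overlapping_batches items size overlap) := by unfold Pre_overlapping_batches; infer_instance

def pvWitness_overlapping_batches : (List (List (String × Int))) × Int × Int :=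
  ([[("slide_index", 0)], [("slide_index", 1)], [("slide_index", 2)]], 2, 1)

def Spec_overlapping_batches (items : List (List (String × Int))) (size : Int) (overlap : Int) (out : List (List (List (String × Int)))) : Prop := out = overlapping_batches_alt items size overlap
instance (items : List (List (String × Int))) (size : Int) (overlap : Int) (out : List (List (List (String × Int)))) : Decidable (Spec_overlapping_batches items size overlap out) := by unfold Spec_overlapping_batches; infer_instance

-- ===== CLAIM (what is proved, stated in full; the proofs are below) =====
def Claim_equal_overlapping_batches : Prop := ∀ (items : List (List (String × Int))) (size : Int) (overlap : Int), Dom_overlapping_batches items size overlap → Pre_overlapping_batches items size overlap → Spec_overlapping_batches items size overlap (overlapping_batches items size overlap)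

-- ===== LEMMAS AND PROOFS =====

-- proof-side intermediary 1: the list of window starts A's loop visits after 0, recursively
def pvStartsB (n size step : Int) (i : Int) : Nat → List Int
  | 0 => []
  | fuel+1 =>
    if i + size < n then i :: pvStartsB n size step (i + step) fuel
    else if i < n then [max 0 (n - size)] else []

-- proof-side intermediary 2: set-based emission over starts (resp. over pre-sliced batches)
def pvEmitB (items : List (List (String × Int))) (size : Int) :
    List Int → PySem.Set (List Int) → List (List (List (String × Int)))
  | [], _ => []
  | st :: rest, seen =>
    let batch := PySem.List.slice items (some st) (some (st + size))
    let key := pvSlideKey batch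
    if PySem.Set.contains seen key then pvEmitB items size rest seen
    else batch :: pvEmitB items size rest (PySem.Set.add seen key)

def pvEmitBat : List (List (List (String × Int))) → PySem.Set (List Int) → List (List (List (String × Int)))
  | [], _ => []
  | b :: rest, seen =>
    if PySem.Set.contains seen (pvSlideKey b) then pvEmitBat rest seen
    else b :: pvEmitBat rest (PySem.Set.add seen (pvSlideKey b))

-- the two slice expressions for the final window agree: both are the last min(size,n) items
lemma pv_final_slice (items : List (List (String × Int))) (size : Int)
    (hs : 0 < size) :
    PySem.List.slice items (some (max 0 ((items.length : Int) - size))) (some (max 0 ((items.length : Int) - size) + size))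
      = PySem.List.slice items (some (max 0 ((items.length : Int) - size))) (some (items.length : Int)) := by
  have h : PySem.List.clampIdx items.length (max 0 ((items.length : Int) - size) + size)
      = PySem.List.clampIdx items.length (items.length : Int) := by
    simp only [PySem.List.clampIdx]
    split_ifs <;> omega
  simp only [PySem.List.slice, h]

-- core: A's loop continuation equals set-based emission over the remaining starts
lemma pv_cont_eq (items : List (List (String × Int))) (size step : Int)
    (hs : 0 < size) (hstep : 1 ≤ step) :
    ∀ (fa : Nat) (i : Int) (y : PySem.Set (List Int)) (fb : Nat),
      (items.length : Int) ≤ i + fa → (items.length : Int) ≤ i + fb →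
      (if (items.length : Int) ≤ i + size ∧ i < (items.length : Int) then
        (let finalb := PySem.List.slice items (some (max 0 ((items.length : Int) - size))) (some (items.length : Int))
         if PySem.Set.contains y (pvSlideKey finalb) then [] else [finalb])
       else pvLoopA items (items.length : Int) size step i y fa)
        = pvEmitB items size (pvStartsB (items.length : Int) size step i fb) y := by
  intro fa
  induction fa with
  | zero =>
    intro i y fb ha hb
    have hi : (items.length : Int) ≤ i := by push_cast at ha; omega
    rw [if_neg (by omega)]
    cases fb with
    | zero => simp [pvLoopA, pvStartsB, pvEmitB]
    | succ fb' =>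
      have h1 : ¬ (i + size < (items.length : Int)) := by omega
      have h2 : ¬ (i < (items.length : Int)) := by omega
      simp [pvLoopA, pvStartsB, pvEmitB, h1, h2]
  | succ fa ih =>
    intro i y fb ha hb
    by_cases hbrk : (items.length : Int) ≤ i + size ∧ i < (items.length : Int)
    · rw [if_pos hbrk]
      obtain ⟨fb', rfl⟩ : ∃ fb', fb = fb' + 1 := ⟨fb - 1, by omega⟩
      have h1 : ¬ (i + size < (items.length : Int)) := by omega
      have h2 : i < (items.length : Int) := hbrk.2
      simp only [pvStartsB, if_neg h1, if_pos h2, pvEmitB]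
      rw [pv_final_slice items size hs]
    · rw [if_neg hbrk]
      by_cases hi : i < (items.length : Int)
      · have hlt : i + size < (items.length : Int) := by
          rcases not_and_or.mp hbrk with h | h
          · omega
          · exact absurd hi h
        obtain ⟨fb', rfl⟩ : ∃ fb', fb = fb' + 1 := ⟨fb - 1, by omega⟩
        simp only [pvLoopA, if_pos hi, pvStartsB, if_pos hlt, pvEmitB]
        by_cases hc : PySem.Set.contains y (pvSlideKey (PySem.List.slice items (some i) (some (i + size)))) = true
        · simp only [hc, not_true_eq_false, if_false, List.nil_append, if_true]
          exact ih (i + step) y fb' (by push_cast at ha ⊢; omega) (by push_cast at hb ⊢; omega)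
        · simp only [hc, Bool.false_eq_true, not_false_eq_true, if_true, if_false, List.singleton_append]
          rw [← apply_ite (fun l : List (List (List (String × Int))) =>
            PySem.List.slice items (some i) (some (i + size)) :: l)]
          exact congrArg _ (ih (i + step) (PySem.Set.add y (pvSlideKey (PySem.List.slice items (some i) (some (i + size))))) fb'
            (by push_cast at ha ⊢; omega) (by push_cast at hb ⊢; omega))
      · have h1 : ¬ (i + size < (items.length : Int)) := by omega
        cases fb with
        | zero => simp [pvLoopA, pvStartsB, pvEmitB, hi]
        | succ fb' => simp [pvLoopA, pvStartsB, pvEmitB, h1, hi]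

-- A's whole loop, from the top, is set-based emission over 0 :: recursive starts
lemma pv_A_eq_emit (items : List (List (String × Int))) (size step : Int)
    (hs : 0 < size) (hstep : 1 ≤ step) (hn : (0:Int) < items.length) :
    pvLoopA items (items.length : Int) size step 0 PySem.Set.empty (items.length + 1)
      = pvEmitB items size (0 :: pvStartsB (items.length : Int) size step step (items.length + 1)) PySem.Set.empty := by
  simp only [pvLoopA, if_pos hn, pvEmitB]
  have hce : ∀ k : List Int, PySem.Set.contains PySem.Set.empty k = false := by
    intro k; rfl
  simp only [hce, Bool.false_eq_true, not_false_eq_true, if_true, if_false, List.singleton_append,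
    zero_add]
  rw [← pv_cont_eq items size _ hs hstep (items.length) _ _ (items.length + 1)
    (by omega) (by omega)]
  rw [← apply_ite (fun l : List (List (List (String × Int))) =>
    PySem.List.slice items (some 0) (some size) :: l)]

-- Set.add membership in terms of the old set
lemma pv_contains_add (s : PySem.Set (List Int)) (x y : List Int) :
    PySem.Set.contains (PySem.Set.add s x) y = (y == x || PySem.Set.contains s y) := by
  simp only [PySem.Set.contains, PySem.Set.add, List.contains_eq_mem, decide_eq_true_eq]
  split_ifs with h <;> by_cases hy : y = x <;> simp [hy, h, List.mem_append]

-- Source B's setdefault loop produces, as its values, exactly the set-based emission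
lemma pv_dedup_values (bs : List (List (List (String × Int)))) :
    ∀ (d : PySem.Dict (List Int) (List (List (String × Int)))) (s : PySem.Set (List Int)),
      (∀ k, PySem.Set.contains s k = PySem.Dict.contains d k) →
      (pvDedupB bs d).values = d.values ++ pvEmitBat bs s := by
  induction bs with
  | nil => intro d s _; simp [pvDedupB, pvEmitBat]
  | cons b rest ih =>
    intro d s hcs
    simp only [pvDedupB, pvEmitBat]
    by_cases hc : PySem.Dict.contains d (pvSlideKey b) = true
    · rw [PySem.Dict.setdefault_of_contains (h := hc), hcs, if_pos hc]
      exact ih d s hcs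
    · have hc' : PySem.Dict.contains d (pvSlideKey b) = false := by
        simpa using hc
      rw [PySem.Dict.setdefault_of_not_contains (h := hc'), hcs, hc', if_neg (by simp)]
      rw [ih (d.insert (pvSlideKey b) b) (PySem.Set.add s (pvSlideKey b)) ?_]
      · have hv : (d.insert (pvSlideKey b) b).values = d.values ++ [b] := by
          simp [PySem.Dict.values, PySem.Dict.items_insert_of_not_contains (h := hc')]
        simp [hv]
      · intro k
        rw [pv_contains_add, PySem.Dict.contains_insert, hcs]

-- emission over starts is emission over the corresponding slices
lemma pv_emit_map (items : List (List (String × Int))) (size : Int) :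
    ∀ (sts : List Int) (s : PySem.Set (List Int)),
      pvEmitB items size sts s
        = pvEmitBat (sts.map (fun st => PySem.List.slice items (some st) (some (st + size)))) s := by
  intro sts
  induction sts with
  | nil => intro s; simp [pvEmitB, pvEmitBat]
  | cons st rest ih =>
    intro s
    simp only [pvEmitB, pvEmitBat, List.map_cons]
    split_ifs with h
    · exact ih s
    · exact congrArg _ (ih _)

-- the recursive starts from A's loop equal B's closed-form range of starts
lemma pv_starts_closed (n size step : Int) (hstep : 1 ≤ step)
    (m : Int) (hm : m = 1 + (if n > size then PySem.Int.floordiv (n - size - 1) step else 0)) :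
    ∀ (fuel : Nat) (k : Int), 1 ≤ k → k ≤ m → (m - k).toNat < fuel →
      pvStartsB n size step (k * step) fuel
        = (PySem.List.pyRange k m 1).map (· * step)
          ++ (if m * step < n then [max 0 (n - size)] else []) := by
  have hkm : ∀ k : Int, 1 ≤ k → (k * step + size < n ↔ k < m) := by
    intro k hk
    by_cases hns : n > size
    · rw [hm, if_pos hns]
      have hb : (k ≤ PySem.Int.floordiv (n - size - 1) step) ↔ k * step ≤ n - size - 1 :=
        PySem.Int.le_floordiv_iff_mul_le (by omega)
      omega
    · rw [hm, if_neg hns]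
      constructor
      · intro h; nlinarith
      · intro h; omega
  intro fuel
  induction fuel with
  | zero => intro k _ _ h; omega
  | succ fuel ih =>
    intro k hk1 hkm' hfuel
    by_cases hlt : k * step + size < n
    · have hklt : k < m := (hkm k hk1).mp hlt
      rw [pvStartsB, if_pos hlt]
      rw [PySem.List.pyRange_one_cons (show k < m by omega), List.map_cons]
      have he : k * step + step = (k + 1) * step := by ring
      rw [he, ih (k + 1) (by omega) (by omega) (by omega)]
      simp [List.cons_append]
    · have hge : m ≤ k := by
        by_contra hc
        exact hlt ((hkm k hk1).mpr (by omega))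
      have hkeq : k = m := le_antisymm hkm' hge
      subst hkeq
      rw [pvStartsB, if_neg hlt]
      have hrange : PySem.List.pyRange k k 1 = [] := by
        simp [PySem.List.pyRange]
      rw [hrange, List.map_nil, List.nil_append]

-- ===== VERDICT =====

theorem overlapping_batches_spec : Claim_equal_overlapping_batches := by
  intro items size overlap hdom hpre
  unfold Spec_overlapping_batches overlapping_batches overlapping_batches_alt
  by_cases hs : size ≤ 0
  · simp [hs]
  · rw [if_neg hs, if_neg hs]
    by_cases h0 : (items.length : Int) = 0
    · simp [h0]
    · rw [if_neg h0, if_neg h0]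
      have hsz : 0 < size := by omega
      have hn : (0:Int) < items.length := by omega
      set step := if size > overlap then size - overlap else size with hstepdef
      have hstep : 1 ≤ step := by rw [hstepdef]; split_ifs <;> omega
      set m := 1 + (if (items.length : Int) > size then PySem.Int.floordiv ((items.length : Int) - size - 1) step else 0) with hmdef
      have hm1 : 1 ≤ m := by
        rw [hmdef]
        by_cases hns : (items.length : Int) > size
        · rw [if_pos hns]
          have := (PySem.Int.le_floordiv_iff_mul_le (a := (items.length : Int) - size - 1)
            (q := 0) (show (0:Int) < step by omega)).mpr (by omega)
          omega
        · rw [if_neg hns]; omega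
      have hmn : m ≤ (items.length : Int) := by
        rw [hmdef]
        by_cases hns : (items.length : Int) > size
        · rw [if_pos hns]
          have hlt := (PySem.Int.floordiv_lt_iff_lt_mul (a := (items.length : Int) - size - 1)
            (q := (items.length : Int)) (show (0:Int) < step by omega)).mpr (by nlinarith)
          omega
        · rw [if_neg hns]; omega
      show pvLoopA items (items.length : Int) size step 0 PySem.Set.empty (items.length + 1)
        = (pvDedupB (if m * step < (items.length : Int) then
              ((PySem.List.pyRange 0 m 1).map
                (fun k => PySem.List.slice items (some (k * step)) (some (k * step + size))))
                ++ [PySem.List.slice items (some (max 0 ((items.length : Int) - size))) (some (items.length : Int))]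
            else ((PySem.List.pyRange 0 m 1).map
                (fun k => PySem.List.slice items (some (k * step)) (some (k * step + size)))))
            PySem.Dict.empty).values
      rw [pv_A_eq_emit items size step hsz hstep hn]
      rw [pv_emit_map]
      rw [pv_dedup_values _ PySem.Dict.empty PySem.Set.empty (fun k => rfl)]
      rw [show (PySem.Dict.empty : PySem.Dict (List Int) (List (List (String × Int)))).values = [] from rfl,
        List.nil_append]
      congr 1
      have hst := pv_starts_closed (items.length : Int) size step hstep m hmdef
        (items.length + 1) 1 le_rfl hm1 (by omega)
      rw [one_mul] at hst
      rw [hst]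
      rw [PySem.List.pyRange_one_cons (show (0:Int) < m by omega), List.map_cons, List.map_cons,
        List.map_append]
      rw [show (0:Int) * step = 0 from by ring]
      by_cases htail : m * step < (items.length : Int)
      · rw [if_pos htail, if_pos htail]
        simp only [List.map_cons, List.map_map, List.map_nil, List.cons_append]
        rw [pv_final_slice items size hsz]
        norm_num [Function.comp_def]
      · rw [if_neg htail, if_neg htail]
        simp only [List.map_map, List.map_nil, List.append_nil]
        norm_num [Function.comp_def]
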